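-- pv_equiv track=rewrite | github.com/sha-env/cipher | Playfair Cipher/GUI Version.py | prepare_plaintext
-- ===== SOURCE A (Python) =====
-- J_REPLACEMENT = 'I' # J is replaced by I in standard Playfair
--
-- def prepare_plaintext(plaintext):
--     """
--     Cleans and prepares plaintext for Playfair:
--     1. Removes non-alpha chars, replaces J with I.
--     2. Breaks into digrams (pairs).
--     3. Inserts filler ('X') for double letters and odd length.
--     """
--
--     text = ''.join(c for c in plaintext.upper() if c.isalpha())
--     text = text.replace('J', J_REPLACEMENT)
--
--     processed_text = ""
--     i = 0
--     while i < len(text):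
--         c1 = text[i]
--
--         if i + 1 == len(text):
--             # Odd length: append filler 'X'
--             processed_text += c1 + 'X'
--             i += 1
--         else:
--             c2 = text[i+1]
--             if c1 == c2:
--                 # Double letters: append filler 'X', don't advance i (so the second letter can be re-paired)
--                 processed_text += c1 + 'X'
--                 i += 1
--             else:
--                 # Normal digram
--                 processed_text += c1 + c2
--                 i += 2
--
--     return processed_text
-- ===== SOURCE B (Python) =====
-- J_REPLACEMENT = 'I' # J is replaced by I in standard Playfair
--
-- def prepare_plaintext(plaintext):
--     # Same cleaning prelude as the original.
--     text = ''.join(c for c in plaintext.upper() if c.isalpha())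
--     text = text.replace('J', J_REPLACEMENT)
--
--     # Single pass with one pending character instead of an index-based while loop.
--     parts = []
--     pending = None
--     for c in text:
--         if pending is None:
--             pending = c
--         elif c == pending:
--             parts.append(pending + 'X')
--             pending = c
--         else:
--             parts.append(pending + c)
--             pending = None
--     if pending is not None:
--         parts.append(pending + 'X')
--     return ''.join(parts)
-- ===== Notes on version B (the rewrite author's own statement) =====
-- stated objective: simpler
-- what changed: Replaced the index-based while loop with its i+1/i+2 stepping and repeated string concatenation by a single fold over the cleaned characters maintaining one pending character and a list of digrams joined at the end.
import Mathlib
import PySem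

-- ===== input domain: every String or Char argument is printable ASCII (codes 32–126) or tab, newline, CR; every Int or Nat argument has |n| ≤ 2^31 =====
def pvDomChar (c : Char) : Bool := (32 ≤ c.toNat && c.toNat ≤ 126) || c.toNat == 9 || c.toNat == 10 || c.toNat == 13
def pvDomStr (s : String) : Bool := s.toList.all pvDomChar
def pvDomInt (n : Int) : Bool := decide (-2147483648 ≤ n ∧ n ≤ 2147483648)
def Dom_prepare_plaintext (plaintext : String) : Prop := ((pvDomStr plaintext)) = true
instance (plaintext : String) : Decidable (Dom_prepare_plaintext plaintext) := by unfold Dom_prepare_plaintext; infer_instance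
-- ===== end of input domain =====

-- B replaces A's index-based while loop by a single fold keeping one 'pending' character (objective: simpler decomposition; same cleaning prelude).

-- ===== PORT A =====
-- A's while loop over indices i into 'text', accumulating processed_text.
def pvALoop (text : List Char) (i : Nat) (acc : List Char) : List Char :=
  if _h : i < text.length then
    let c1 := text.getD i ' '          -- text[i], in range here
    if i + 1 = text.length then
      pvALoop text (i + 1) (acc ++ [c1, 'X'])
    else
      let c2 := text.getD (i + 1) ' '  -- text[i+1], in range here
      if c1 = c2 then
        pvALoop text (i + 1) (acc ++ [c1, 'X'])
      else
        pvALoop text (i + 2) (acc ++ [c1, c2])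
  else acc
termination_by text.length - i

def prepare_plaintext (plaintext : String) : String :=
  String.mk (pvALoop (PySem.Chars.replace
    ((PySem.Chars.upper plaintext.toList).filter PySem.Chars.isalpha) ['J'] ['I']) 0 [])

-- ===== PORT B =====
-- B's per-character step on the state (emitted chars, pending char).
def pvBStep (s : List Char × Option Char) (c : Char) : List Char × Option Char :=
  match s.2 with
  | none => (s.1, some c)
  | some p => if c = p then (s.1 ++ [p, 'X'], some c) else (s.1 ++ [p, c], none)

-- B's trailing 'if pending is not None' flush.
def pvBFinish (s : List Char × Option Char) : List Char :=
  match s.2 with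
  | some p => s.1 ++ [p, 'X']
  | none => s.1

def prepare_plaintext_alt (plaintext : String) : String :=
  String.mk (pvBFinish ((PySem.Chars.replace
    ((PySem.Chars.upper plaintext.toList).filter PySem.Chars.isalpha) ['J'] ['I']).foldl pvBStep ([], none)))

-- ===== PRECONDITION & SPEC =====
def Spec_prepare_plaintext (plaintext : String) (out : String) : Prop := out = prepare_plaintext_alt plaintext
instance (plaintext : String) (out : String) : Decidable (Spec_prepare_plaintext plaintext out) := by unfold Spec_prepare_plaintext; infer_instance

-- ===== CLAIM (what is proved, stated in full; the proofs are below) =====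
def Claim_equal_prepare_plaintext : Prop := ∀ (plaintext : String), Dom_prepare_plaintext plaintext → Spec_prepare_plaintext plaintext (prepare_plaintext plaintext)

-- ===== LEMMAS AND PROOFS =====

-- Common digram recursion both loops compute.
def pvLoopL : List Char → List Char → List Char
  | [], acc => acc
  | [c], acc => acc ++ [c, 'X']
  | c1 :: c2 :: rest, acc =>
    if c1 = c2 then pvLoopL (c2 :: rest) (acc ++ [c1, 'X'])
    else pvLoopL rest (acc ++ [c1, c2])

theorem pvLoopL_nil (acc : List Char) : pvLoopL [] acc = acc := rfl
theorem pvLoopL_single (c : Char) (acc : List Char) : pvLoopL [c] acc = acc ++ [c, 'X'] := rfl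
theorem pvLoopL_cons_cons (c1 c2 : Char) (rest acc : List Char) :
    pvLoopL (c1 :: c2 :: rest) acc =
      if c1 = c2 then pvLoopL (c2 :: rest) (acc ++ [c1, 'X']) else pvLoopL rest (acc ++ [c1, c2]) := rfl

theorem pvB_pending (n : Nat) : ∀ (rest : List Char), rest.length ≤ n → ∀ (acc : List Char) (p : Char),
    pvBFinish (rest.foldl pvBStep (acc, some p)) = pvLoopL (p :: rest) acc := by
  induction n with
  | zero =>
    intro rest h acc p
    have : rest = [] := List.eq_nil_of_length_eq_zero (Nat.le_zero.mp h)
    subst this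
    rfl
  | succ n ih =>
    intro rest h acc p
    match rest with
    | [] => rfl
    | c :: rest' =>
      rw [List.foldl_cons]
      by_cases hc : c = p
      · subst hc
        rw [show pvBStep (acc, some c) c = (acc ++ [c, 'X'], some c) from by simp [pvBStep]]
        rw [ih rest' (by simpa using Nat.le_of_succ_le_succ h) (acc ++ [c, 'X']) c]
        rw [pvLoopL_cons_cons, if_pos rfl]
      · rw [show pvBStep (acc, some p) c = (acc ++ [p, c], none) from by simp [pvBStep, hc]]
        match rest' with
        | [] =>
          rw [pvLoopL_cons_cons, if_neg (Ne.symm hc)]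
          rfl
        | d :: rest'' =>
          rw [List.foldl_cons]
          rw [show pvBStep (acc ++ [p, c], none) d = (acc ++ [p, c], some d) from rfl]
          rw [ih rest'' (by simp at h ⊢; omega) (acc ++ [p, c]) d]
          rw [pvLoopL_cons_cons, if_neg (Ne.symm hc)]

theorem pvB_eq_loopL (l : List Char) (acc : List Char) :
    pvBFinish (l.foldl pvBStep (acc, none)) = pvLoopL l acc := by
  match l with
  | [] => rfl
  | c :: rest =>
    rw [List.foldl_cons, show pvBStep (acc, none) c = (acc, some c) from rfl]
    exact pvB_pending rest.length rest le_rfl acc c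

theorem pvA_eq_loopL (text : List Char) : ∀ (n i : Nat) (acc : List Char), text.length - i ≤ n →
    pvALoop text i acc = pvLoopL (text.drop i) acc := by
  intro n
  induction n with
  | zero =>
    intro i acc hn
    have h : ¬ i < text.length := by omega
    rw [pvALoop]
    rw [dif_neg h, List.drop_eq_nil_of_le (by omega), pvLoopL_nil]
  | succ n ih =>
    intro i acc hn
    by_cases h : i < text.length
    · have hdrop : text.drop i = text[i] :: text.drop (i + 1) := List.drop_eq_getElem_cons h
      rw [pvALoop]
      rw [dif_pos h]
      simp only [List.getD_eq_getElem _ _ h]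
      by_cases hlast : i + 1 = text.length
      · rw [if_pos hlast, pvALoop, dif_neg (by omega : ¬ i + 1 < text.length)]
        rw [hdrop, hlast, List.drop_length, pvLoopL_single]
      · rw [if_neg hlast]
        have h2 : i + 1 < text.length := by omega
        have hdrop2 : text.drop (i + 1) = text[i + 1] :: text.drop (i + 2) :=
          List.drop_eq_getElem_cons h2
        simp only [List.getD_eq_getElem _ _ h2]
        rw [hdrop, hdrop2, pvLoopL_cons_cons]
        by_cases hc : text[i] = text[i + 1]
        · rw [if_pos hc, ih (i + 1) _ (by omega), hdrop2, if_pos hc]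
        · rw [if_neg hc, ih (i + 2) _ (by omega), if_neg hc]
    · rw [pvALoop, dif_neg h, List.drop_eq_nil_of_le (by omega), pvLoopL_nil]

-- ===== VERDICT (by name: the statement is the Claim_ definition above) =====
theorem prepare_plaintext_spec : Claim_equal_prepare_plaintext := by
  intro plaintext _
  unfold Spec_prepare_plaintext prepare_plaintext prepare_plaintext_alt
  rw [pvB_eq_loopL,
    pvA_eq_loopL _ (PySem.Chars.replace
      ((PySem.Chars.upper plaintext.toList).filter PySem.Chars.isalpha) ['J'] ['I']).length 0 [] (by omega),
    List.drop_zero]
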